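-- pv_equiv track=rewrite | github.com/dariRusAG/ACSI-Matic | main.py | _sample_sentences
-- ===== SOURCE A (Python) =====
-- def _sample_sentences(synonyms_matrix, main_sentence):
--     sentence_result = ''
--
--     for sent, s_table in synonyms_matrix.items():
--         k = 0
--         for word, score in s_table.items():
--             if score > 1:
--                 k += 1
--         if k == 0:  # синонимов нет
--             for sentence in main_sentence:
--                 if sent == sentence[:15]:
--                     sentence_result += sentence + " "
--
--     return sentence_result
-- ===== SOURCE B (Python) =====
-- def _sample_sentences(synonyms_matrix, main_sentence):
--     # Group sentences by their 15-char prefix once, then one dict lookup per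
--     # synonym-free matrix entry (instead of rescanning main_sentence each time).
--     by_prefix = {}
--     for sentence in main_sentence:
--         p = sentence[:15]
--         by_prefix[p] = by_prefix.get(p, '') + sentence + ' '
--     parts = []
--     for sent, s_table in synonyms_matrix.items():
--         if all(score <= 1 for score in s_table.values()):
--             parts.append(by_prefix.get(sent, ''))
--     return ''.join(parts)
-- ===== Notes on version B (the rewrite author's own statement) =====
-- stated objective: faster
-- what changed: Instead of rescanning main_sentence for every synonym-free matrix entry, B builds one dict mapping each 15-char prefix to the concatenation of its sentences and does a single O(1) lookup per entry, joining the pieces at the end.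
import Mathlib
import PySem

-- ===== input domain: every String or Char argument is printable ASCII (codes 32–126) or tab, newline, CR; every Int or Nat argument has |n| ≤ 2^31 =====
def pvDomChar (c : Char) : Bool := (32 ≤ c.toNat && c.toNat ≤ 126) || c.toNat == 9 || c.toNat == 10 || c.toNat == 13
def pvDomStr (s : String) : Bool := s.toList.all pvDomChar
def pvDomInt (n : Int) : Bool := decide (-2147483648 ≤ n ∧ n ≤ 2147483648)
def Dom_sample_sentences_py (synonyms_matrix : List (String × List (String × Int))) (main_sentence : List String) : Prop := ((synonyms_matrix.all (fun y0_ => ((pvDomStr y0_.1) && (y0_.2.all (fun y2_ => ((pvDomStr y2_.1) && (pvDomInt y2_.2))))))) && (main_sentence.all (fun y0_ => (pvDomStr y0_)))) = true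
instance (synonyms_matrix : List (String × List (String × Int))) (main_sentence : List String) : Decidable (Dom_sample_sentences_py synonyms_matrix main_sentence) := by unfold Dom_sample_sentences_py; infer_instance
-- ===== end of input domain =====

-- B replaces A's per-entry rescan of main_sentence by one prefix→concatenation dict
-- built in a single pass, plus an O(1) lookup per synonym-free matrix entry (objective: faster).

-- ===== PORT A =====
def sample_sentences_py (synonyms_matrix : List (String × List (String × Int))) (main_sentence : List String) : String :=
  synonyms_matrix.foldl (fun sentence_result st =>
    let k : Int := st.2.foldl (fun k ws => if ws.2 > 1 then k + 1 else k) 0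
    if k == 0 then
      main_sentence.foldl (fun r sentence =>
        if st.1 == PySem.Str.slice sentence none (some 15) then r ++ sentence ++ " " else r)
        sentence_result
    else sentence_result) ""

-- ===== PORT B =====
def sample_sentences_py_alt (synonyms_matrix : List (String × List (String × Int))) (main_sentence : List String) : String :=
  let byPrefix : PySem.Dict String String := main_sentence.foldl (fun d sentence =>
      let p := PySem.Str.slice sentence none (some 15)
      d.insert p (d.getD p "" ++ sentence ++ " ")) PySem.Dict.empty
  let parts : List String := synonyms_matrix.foldl (fun parts st =>
      if (st.2.map Prod.snd).all (fun score => decide (score ≤ 1))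
      then parts ++ [byPrefix.getD st.1 ""] else parts) []
  PySem.Str.join "" parts

-- ===== PRECONDITION & SPEC =====
def Spec_sample_sentences_py (synonyms_matrix : List (String × List (String × Int))) (main_sentence : List String) (out : String) : Prop := out = sample_sentences_py_alt synonyms_matrix main_sentence
instance (synonyms_matrix : List (String × List (String × Int))) (main_sentence : List String) (out : String) : Decidable (Spec_sample_sentences_py synonyms_matrix main_sentence out) := by unfold Spec_sample_sentences_py; infer_instance

-- ===== CLAIM (what is proved, stated in full; the proofs are below) =====
def Claim_equal_sample_sentences_py : Prop := ∀ (synonyms_matrix : List (String × List (String × Int))) (main_sentence : List String), Dom_sample_sentences_py synonyms_matrix main_sentence → Spec_sample_sentences_py synonyms_matrix main_sentence (sample_sentences_py synonyms_matrix main_sentence)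

-- ===== LEMMAS AND PROOFS =====

-- ''.join on an empty / cons list of strings
theorem pv_join_nil : PySem.Str.join "" ([] : List String) = "" := by
  apply String.toList_inj.mp
  simp [PySem.Str.toList_join, PySem.Chars.join, List.intercalate]

theorem pv_join_cons (a : String) (l : List String) :
    PySem.Str.join "" (a :: l) = a ++ PySem.Str.join "" l := by
  apply String.toList_inj.mp
  simp [PySem.Str.toList_join, PySem.Chars.join, List.intercalate]
  cases l <;> simp

-- A's inner loop hoists its accumulator out front
theorem pv_inner_hoist (ms : List String) (sent res : String) :
    ms.foldl (fun r s => if sent == PySem.Str.slice s none (some 15) then r ++ s ++ " " else r) res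
      = res ++ ms.foldl (fun r s => if sent == PySem.Str.slice s none (some 15) then r ++ s ++ " " else r) "" := by
  induction ms generalizing res with
  | nil => simp
  | cons s rest ih =>
    simp only [List.foldl_cons]
    rw [ih, ih (if sent == PySem.Str.slice s none (some 15) then "" ++ s ++ " " else "")]
    split_ifs <;> simp [String.append_assoc]

-- looking up a key in B's prefix dict gives exactly what A's inner loop appends
theorem pv_dict_getD (ms : List String) (d : PySem.Dict String String) (sent : String) :
    (ms.foldl (fun d sentence =>
        let p := PySem.Str.slice sentence none (some 15)
        d.insert p (d.getD p "" ++ sentence ++ " ")) d).getD sent ""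
      = d.getD sent ""
        ++ ms.foldl (fun r s => if sent == PySem.Str.slice s none (some 15) then r ++ s ++ " " else r) "" := by
  induction ms generalizing d with
  | nil => simp
  | cons s rest ih =>
    simp only [List.foldl_cons]
    rw [ih]
    conv_rhs => rw [pv_inner_hoist rest sent]
    rw [PySem.Dict.getD_insert]
    by_cases h : sent = PySem.Str.slice s none (some 15)
    · have hb : (sent == PySem.Str.slice s none (some 15)) = true := by simp [h]
      rw [if_pos h, hb, h]
      simp [String.append_assoc]
    · have hb : (sent == PySem.Str.slice s none (some 15)) = false := by simp [h]
      rw [if_neg h, hb]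
      simp

-- A's synonym counter is zero exactly when B's all-check holds
theorem pv_count (tbl : List (String × Int)) :
    ((tbl.foldl (fun k ws => if ws.2 > 1 then k + 1 else k) (0 : Int)) == 0)
      = (tbl.map Prod.snd).all (fun score => decide (score ≤ 1)) := by
  have h : (fun (k : Int) (ws : String × Int) => if ws.2 > 1 then k + 1 else k)
      = fun k ws => if (fun (ws : String × Int) => decide (ws.2 > 1)) ws = true then k + 1 else k := by
    funext k ws; simp
  rw [h, PySem.List.foldl_count_if]
  by_cases hall : ∀ ws ∈ tbl, ws.2 ≤ 1
  · have hz : tbl.countP (fun ws => decide (ws.2 > 1)) = 0 := by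
      apply List.countP_eq_zero.mpr
      intro ws hws
      have := hall ws hws
      simp
      omega
    rw [hz]
    symm
    simp only [Nat.cast_zero, Int.add_zero, beq_self_eq_true, List.all_map, List.all_eq_true]
    intro ws hws
    simpa using hall ws hws
  · simp only [not_forall, exists_prop] at hall
    obtain ⟨ws, hmem, hgt⟩ := hall
    have hpos : 0 < tbl.countP (fun ws => decide (ws.2 > 1)) := by
      apply List.countP_pos_iff.mpr
      exact ⟨ws, hmem, by simpa using hgt⟩
    have hne : ((0 : Int) + (tbl.countP (fun ws => decide (ws.2 > 1)) : Int) == 0) = false := by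
      rw [beq_eq_false_iff_ne]
      intro hx
      omega
    rw [hne]
    symm
    simp only [List.all_map, Bool.eq_false_iff, ne_eq, List.all_eq_true, Function.comp]
    intro hc
    have := hc ws hmem
    simp at this
    omega

-- main generalized loop invariant: A's outer fold from any accumulator
theorem pv_main (m : List (String × List (String × Int))) (ms : List String) (res : String) :
    m.foldl (fun sentence_result st =>
      let k : Int := st.2.foldl (fun k ws => if ws.2 > 1 then k + 1 else k) 0
      if k == 0 then
        ms.foldl (fun r sentence =>
          if st.1 == PySem.Str.slice sentence none (some 15) then r ++ sentence ++ " " else r)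
          sentence_result
      else sentence_result) res
    = res ++ PySem.Str.join ""
        (m.foldl (fun parts st =>
          if (st.2.map Prod.snd).all (fun score => decide (score ≤ 1))
          then parts ++ [(ms.foldl (fun d sentence =>
              let p := PySem.Str.slice sentence none (some 15)
              d.insert p (d.getD p "" ++ sentence ++ " ")) PySem.Dict.empty).getD st.1 ""]
          else parts) []) := by
  induction m generalizing res with
  | nil => simp [pv_join_nil]
  | cons st rest ih =>
    simp only [List.foldl_cons]
    rw [PySem.List.foldl_append_if]
    rw [pv_count st.2]
    by_cases hc : (st.2.map Prod.snd).all (fun score => decide (score ≤ 1)) = true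
    · simp only [hc, if_true]
      rw [pv_inner_hoist ms st.1 res, ih, PySem.List.foldl_append_if]
      rw [pv_dict_getD ms PySem.Dict.empty st.1, PySem.Dict.getD_empty]
      simp only [String.empty_append, List.nil_append, List.singleton_append]
      rw [pv_join_cons]
      simp [String.append_assoc]
    · simp only [hc]
      rw [ih, PySem.List.foldl_append_if]
      simp

-- ===== VERDICT (by name: the statement is the Claim_ definition above) =====
theorem sample_sentences_py_spec : Claim_equal_sample_sentences_py := by
  intro m ms _
  unfold Spec_sample_sentences_py sample_sentences_py sample_sentences_py_alt
  rw [pv_main m ms ""]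
  simp
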